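-- pv_equiv track=rewrite | github.com/can-keklik/RecipePostagger | POSTaggerFuncs.py | updateTextWithSemicolon
-- ===== SOURCE A (Python) =====
-- def updateTextWithSemicolon(textArr):
--     retArr = []
--     for eachSent in textArr:
--         tmp = [w for w in eachSent if ";" in w]
--         if len(tmp) > 0:
--             tmpSent = splitSentenceWithSemiColon(eachSent)
--             if len(tmpSent) > 0:
--                 for s in tmpSent:
--                     retArr.append(s)
--         else:
--             retArr.append(eachSent)
--     return retArr
--
-- def splitSentenceWithSemiColon(sentence):
--     retArr = []
--     tmp = []
--     for word in sentence:
--         if ";" not in word: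
--             tmp.append(word)
--         else:
--             retArr.append(tmp)
--             tmp = []
--     if len(tmp) > 0:
--         retArr.append(tmp)
--     return retArr
-- ===== SOURCE B (Python) =====
-- def updateTextWithSemicolon(textArr):
--     retArr = []
--     for sent in textArr:
--         if not any(";" in w for w in sent):
--             retArr.append(sent)
--         else:
--             rest = sent
--             while any(";" in w for w in rest):
--                 j = next(i for i, w in enumerate(rest) if ";" in w)
--                 retArr.append(rest[:j])
--                 rest = rest[j + 1:]
--             if rest:
--                 retArr.append(rest)
--     return retArr
-- ===== Notes on version B (the rewrite author's own statement) =====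
-- stated objective: alternative
-- what changed: A filters each sentence for ';'-words and then runs a separate single-pass accumulator state machine to split it; B inlines the split as a rewrite loop that repeatedly finds the first ';'-word, appends the slice before it directly to the result, and continues past the separator, appending the non-empty remainder at the end.
import Mathlib
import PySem

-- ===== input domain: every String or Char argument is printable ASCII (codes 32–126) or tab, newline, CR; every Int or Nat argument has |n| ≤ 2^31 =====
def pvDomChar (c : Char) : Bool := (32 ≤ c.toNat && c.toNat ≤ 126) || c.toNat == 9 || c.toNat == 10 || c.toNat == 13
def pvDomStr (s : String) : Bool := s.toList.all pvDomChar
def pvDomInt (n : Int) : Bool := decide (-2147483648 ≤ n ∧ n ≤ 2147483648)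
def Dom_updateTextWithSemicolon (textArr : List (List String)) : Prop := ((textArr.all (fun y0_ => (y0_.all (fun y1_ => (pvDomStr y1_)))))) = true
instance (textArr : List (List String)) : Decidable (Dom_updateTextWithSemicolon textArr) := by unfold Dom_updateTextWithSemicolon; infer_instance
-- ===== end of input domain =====

-- B replaces A's per-sentence single-pass accumulator state machine by a rewrite loop that
-- repeatedly slices the sentence at the first ';'-word (take-prefix / drop-past-separator);
-- objective: alternative decomposition, same cost, return value identical.

-- shared helper: Python's  ";" in w
def hasSemi (w : String) : Bool := PySem.Str.isIn ";" w

-- ===== PORT A =====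
def splitSentenceWithSemiColon (sentence : List String) : List (List String) :=
  let st := sentence.foldl
    (fun (st : List (List String) × List String) word =>
      if !hasSemi word then (st.1, st.2 ++ [word])
      else (st.1 ++ [st.2], []))
    ([], [])
  if st.2.length > 0 then st.1 ++ [st.2] else st.1

def updateTextWithSemicolon (textArr : List (List String)) : List (List String) :=
  textArr.foldl
    (fun retArr eachSent =>
      let tmp := eachSent.filter (fun w => hasSemi w)
      if tmp.length > 0 then
        let tmpSent := splitSentenceWithSemiColon eachSent
        if tmpSent.length > 0 then retArr ++ tmpSent else retArr
      else retArr ++ [eachSent])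
    []

-- ===== PORT B =====
-- the while loop of Source B: slice off the prefix before the first ';'-word, drop past the separator, repeat
def splitFirstRec (rest : List String) : List (List String)  :=
  if h : rest.any hasSemi then
    let pre := rest.takeWhile (fun w => !hasSemi w)
    pre :: splitFirstRec (rest.drop (pre.length + 1))
  else
    if rest.isEmpty then [] else [rest]
termination_by rest.length
decreasing_by
  have hne : rest ≠ [] := by rintro rfl; simp at h
  have : 0 < rest.length := List.length_pos_of_ne_nil hne
  simp only [List.length_drop]
  omega

def updateTextWithSemicolon_alt (textArr : List (List String)) : List (List String) :=
  textArr.foldl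
    (fun retArr sent =>
      if sent.any hasSemi then retArr ++ splitFirstRec sent
      else retArr ++ [sent])
    []

-- ===== PRECONDITION & SPEC =====
def Spec_updateTextWithSemicolon (textArr : List (List String)) (out : List (List String)) : Prop := out = updateTextWithSemicolon_alt textArr
instance (textArr : List (List String)) (out : List (List String)) : Decidable (Spec_updateTextWithSemicolon textArr out) := by unfold Spec_updateTextWithSemicolon; infer_instance

-- ===== CLAIM (what is proved, stated in full; the proofs are below) =====
def Claim_equal_updateTextWithSemicolon : Prop := ∀ (textArr : List (List String)), Dom_updateTextWithSemicolon textArr → Spec_updateTextWithSemicolon textArr (updateTextWithSemicolon textArr)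

-- ===== LEMMAS AND PROOFS =====

-- proof-only helpers: a common recursive characterisation of the per-sentence split
def finishSplit (st : List (List String) × List String) : List (List String) :=
  if st.2.length > 0 then st.1 ++ [st.2] else st.1

def splitSpec : List String → List String → List (List String)
  | tmp, [] => if tmp.length > 0 then [tmp] else []
  | tmp, w :: ws =>
    if !hasSemi w then splitSpec (tmp ++ [w]) ws
    else tmp :: splitSpec [] ws

theorem foldl_split_eq_splitSpec (s : List String) :
    ∀ (acc : List (List String)) (tmp : List String),
    finishSplit (s.foldl
      (fun (st : List (List String) × List String) word =>
        if !hasSemi word then (st.1, st.2 ++ [word])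
        else (st.1 ++ [st.2], []))
      (acc, tmp)) = acc ++ splitSpec tmp s := by
  induction s with
  | nil =>
    intro acc tmp
    simp only [List.foldl_nil, splitSpec, finishSplit]
    split <;> simp
  | cons w ws ih =>
    intro acc tmp
    simp only [List.foldl_cons, splitSpec]
    by_cases hw : hasSemi w
    · rw [if_neg (by simp [hw]), if_neg (by simp [hw]), ih (acc ++ [tmp]) []]
      simp
    · rw [if_pos (by simp [hw]), if_pos (by simp [hw])]
      exact ih acc (tmp ++ [w])

theorem splitA_eq_splitSpec (s : List String) :
    splitSentenceWithSemiColon s = splitSpec [] s := by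
  have := foldl_split_eq_splitSpec s [] []
  simpa [splitSentenceWithSemiColon, finishSplit] using this

theorem splitSpec_no_sep (s : List String) (h : s.all (fun w => !hasSemi w)) :
    ∀ tmp, splitSpec tmp s = if (tmp ++ s).length > 0 then [tmp ++ s] else [] := by
  induction s with
  | nil => intro tmp; simp [splitSpec]
  | cons w ws ih =>
    intro tmp
    simp only [List.all_cons, Bool.and_eq_true] at h
    simp only [splitSpec, h.1]
    rw [ih h.2]
    simp

theorem splitSpec_sep (s : List String) (h : s.any hasSemi) :
    ∀ tmp, splitSpec tmp s =
      (tmp ++ s.takeWhile (fun w => !hasSemi w)) ::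
        splitSpec [] (s.drop ((s.takeWhile (fun w => !hasSemi w)).length + 1)) := by
  induction s with
  | nil => simp at h
  | cons w ws ih =>
    intro tmp
    by_cases hw : hasSemi w
    · simp [splitSpec, hw]
    · simp only [Bool.not_eq_true] at hw
      have hws : ws.any hasSemi := by
        simp only [List.any_cons, hw, Bool.false_or] at h
        exact h
      simp only [splitSpec, hw, Bool.not_false, List.takeWhile_cons, if_true]
      rw [ih hws (tmp ++ [w])]
      simp

theorem splitFirstRec_eq_splitSpec (s : List String) :
    splitFirstRec s = splitSpec [] s := by
  induction hn : s.length using Nat.strong_induction_on generalizing s with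
  | _ n ih =>
  by_cases h : s.any hasSemi
  · rw [splitFirstRec, dif_pos h, splitSpec_sep s h []]
    have hne : s ≠ [] := by rintro rfl; simp at h
    have hpos : 0 < s.length := List.length_pos_of_ne_nil hne
    rw [List.nil_append]
    dsimp only
    congr 1
    have hlt : (s.drop ((s.takeWhile (fun w => !hasSemi w)).length + 1)).length < n := by
      rw [List.length_drop]; omega
    exact ih _ hlt _ rfl
  · rw [splitFirstRec, dif_neg h]
    rw [splitSpec_no_sep s (by simpa using h) []]
    rcases s with _ | ⟨w, ws⟩ <;> simp

theorem splitA_eq_splitFirstRec (s : List String) :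
    splitSentenceWithSemiColon s = splitFirstRec s := by
  rw [splitA_eq_splitSpec, splitFirstRec_eq_splitSpec]

theorem splitFirstRec_ne_nil (s : List String) (h : s.any hasSemi) :
    splitFirstRec s ≠ [] := by
  rw [splitFirstRec, dif_pos h]
  simp

theorem foldl_AB (ts : List (List String)) :
    ∀ (acc : List (List String)),
    ts.foldl
      (fun retArr eachSent =>
        let tmp := eachSent.filter (fun w => hasSemi w)
        if tmp.length > 0 then
          let tmpSent := splitSentenceWithSemiColon eachSent
          if tmpSent.length > 0 then retArr ++ tmpSent else retArr
        else retArr ++ [eachSent]) acc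
    = ts.foldl
      (fun retArr sent =>
        if sent.any hasSemi then retArr ++ splitFirstRec sent
        else retArr ++ [sent]) acc := by
  induction ts with
  | nil => intro acc; rfl
  | cons sent ts ih =>
    intro acc
    simp only [List.foldl_cons]
    rw [ih]
    congr 1
    have hfa : ((sent.filter (fun w => hasSemi w)).length > 0)
        ↔ (sent.any hasSemi = true) := by
      simp [List.length_pos_iff, List.filter_eq_nil_iff, List.any_eq_true]
    by_cases h : sent.any hasSemi
    · have hpos : (splitFirstRec sent).length > 0 :=
        List.length_pos_of_ne_nil (splitFirstRec_ne_nil sent h)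
      rw [if_pos (hfa.mpr h), splitA_eq_splitFirstRec, if_pos hpos, if_pos h]
    · rw [if_neg (fun hc => h (hfa.mp hc)), if_neg h]

-- ===== VERDICT (by name: the statement is the Claim_ definition above) =====
theorem updateTextWithSemicolon_spec : Claim_equal_updateTextWithSemicolon := by
  intro textArr _
  unfold Spec_updateTextWithSemicolon updateTextWithSemicolon updateTextWithSemicolon_alt
  exact foldl_AB textArr []
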